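-- pv_equiv track=rewrite | github.com/Kokoroou/personal-toolbox | personal_tools/file_tools/cleaning/check_duplicated.py | check_self_duplicate
-- ===== SOURCE A (Python) =====
-- from typing import Union, List, Tuple
--
-- def check_self_duplicate(folder_properties: list, ignore_indexes: list = None
--                          ) -> Tuple[list, list]:
--     """
--     Get duplicate file indexes in a folder and its original file indexes for matching
--
--     :param folder_properties: List of files' properties (checksum, name,...) in a folder,
--         which is used to compare
--     :param ignore_indexes: List of indexes to ignore (because they are already checked)
--     :return: List of duplicate file indexes and their original file indexes
--     """
--     duplicate_indexes = []
--     original_indexes = []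
--
--     if not ignore_indexes:
--         ignore_indexes = []
--
--     temp = {}
--     for i, element in enumerate(folder_properties):
--         if i in ignore_indexes:
--             continue
--         if element in temp:
--             duplicate_indexes.append(i)
--             original_indexes.append(temp[element])
--         else:
--             temp[element] = i
--
--     return duplicate_indexes, original_indexes
-- ===== SOURCE B (Python) =====
-- def check_self_duplicate(folder_properties: list, ignore_indexes: list = None):
--     if not ignore_indexes:
--         ignore_indexes = []
--
--     # Pass 1: build the full table of earliest non-ignored index per element.
--     first_idx = {}
--     for i, element in enumerate(folder_properties):
--         if i in ignore_indexes:
--             continue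
--         if element not in first_idx:
--             first_idx[element] = i
--
--     # Pass 2: detect duplicates against the completed table.
--     duplicate_indexes = []
--     original_indexes = []
--     for i, element in enumerate(folder_properties):
--         if i in ignore_indexes:
--             continue
--         if first_idx[element] != i:
--             duplicate_indexes.append(i)
--             original_indexes.append(first_idx[element])
--     return duplicate_indexes, original_indexes
-- ===== Notes on version B (the rewrite author's own statement) =====
-- stated objective: alternative
-- what changed: Replaces A's single interleaved pass (dict grown while detecting) by two separate passes: first fully build a dict mapping each element to its earliest non-ignored index, then scan again and report each non-ignored position whose recorded first index differs from it.
import Mathlib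
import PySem

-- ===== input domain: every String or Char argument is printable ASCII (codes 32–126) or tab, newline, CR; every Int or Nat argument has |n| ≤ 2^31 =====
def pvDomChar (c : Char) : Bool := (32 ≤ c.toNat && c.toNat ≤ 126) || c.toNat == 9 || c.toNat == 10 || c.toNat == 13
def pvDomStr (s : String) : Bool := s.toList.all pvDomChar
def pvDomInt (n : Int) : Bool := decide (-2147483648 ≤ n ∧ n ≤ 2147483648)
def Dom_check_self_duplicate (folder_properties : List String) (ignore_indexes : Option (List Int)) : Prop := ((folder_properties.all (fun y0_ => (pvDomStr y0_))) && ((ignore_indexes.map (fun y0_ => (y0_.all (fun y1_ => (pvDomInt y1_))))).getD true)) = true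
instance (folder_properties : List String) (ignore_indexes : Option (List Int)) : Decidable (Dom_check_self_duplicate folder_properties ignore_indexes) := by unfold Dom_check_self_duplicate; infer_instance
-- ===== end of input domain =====

-- B replaces A's single interleaved pass by two passes: build the full first-index table, then detect; same results, similar cost (objective: alternative).

-- ===== PORT A =====
-- A's loop body (one enumerate step over the state (duplicate_indexes, original_indexes, temp)).
def pvStepA (ign : List Int) (st : List Int × List Int × PySem.Dict String Int)
    (p : Int × String) : List Int × List Int × PySem.Dict String Int :=
  if ign.contains p.1 then st
  else
    -- 'if element in temp: … temp[element] …  else: temp[element] = i' as a match on get?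
    match st.2.2.get? p.2 with
    | some j => (st.1 ++ [p.1], st.2.1 ++ [j], st.2.2)
    | none => (st.1, st.2.1, st.2.2.insert p.2 p.1)

def check_self_duplicate (folder_properties : List String) (ignore_indexes : Option (List Int)) : List Int × List Int :=
  -- 'if not ignore_indexes: ignore_indexes = []' — exact: the only falsy values are None and [], both become []
  let ign : List Int := ignore_indexes.getD []
  let r := (PySem.List.enumerate folder_properties 0).foldl (pvStepA ign) ([], [], PySem.Dict.empty)
  (r.1, r.2.1)

-- ===== PORT B =====
-- B's first-pass body: record the earliest non-ignored index of each element.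
def pvBuildB (ign : List Int) (d : PySem.Dict String Int) (p : Int × String) : PySem.Dict String Int :=
  if ign.contains p.1 then d
  else if d.contains p.2 then d else d.insert p.2 p.1

-- B's second-pass body; 'first_idx[element]' ported as get? + getD 0 (exact: the key is always present when read, so no KeyError occurs).
def pvStepB (ign : List Int) (first_idx : PySem.Dict String Int)
    (acc : List Int × List Int) (p : Int × String) : List Int × List Int :=
  if ign.contains p.1 then acc
  else if (first_idx.get? p.2).getD 0 != p.1 then
    (acc.1 ++ [p.1], acc.2 ++ [(first_idx.get? p.2).getD 0])
  else acc

def check_self_duplicate_alt (folder_properties : List String) (ignore_indexes : Option (List Int)) : List Int × List Int :=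
  let ign : List Int := ignore_indexes.getD []
  let first_idx := (PySem.List.enumerate folder_properties 0).foldl (pvBuildB ign) PySem.Dict.empty
  (PySem.List.enumerate folder_properties 0).foldl (pvStepB ign first_idx) ([], [])

-- ===== PRECONDITION & SPEC =====
def Spec_check_self_duplicate (folder_properties : List String) (ignore_indexes : Option (List Int)) (out : List Int × List Int) : Prop := out = check_self_duplicate_alt folder_properties ignore_indexes
instance (folder_properties : List String) (ignore_indexes : Option (List Int)) (out : List Int × List Int) : Decidable (Spec_check_self_duplicate folder_properties ignore_indexes out) := by unfold Spec_check_self_duplicate; infer_instance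

-- ===== CLAIM (what is proved, stated in full; the proofs are below) =====
def Claim_equal_check_self_duplicate : Prop := ∀ (folder_properties : List String) (ignore_indexes : Option (List Int)), Dom_check_self_duplicate folder_properties ignore_indexes → Spec_check_self_duplicate folder_properties ignore_indexes (check_self_duplicate folder_properties ignore_indexes)

-- ===== LEMMAS AND PROOFS =====

-- B's first pass never changes an entry that is already present.
theorem pvBuild_preserve (ign : List Int) (l : List (Int × String)) (d : PySem.Dict String Int)
    (k : String) (j : Int) (h : d.get? k = some j) :
    (l.foldl (pvBuildB ign) d).get? k = some j := by
  induction l generalizing d with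
  | nil => simpa using h
  | cons p rest ih =>
    simp only [List.foldl_cons, pvBuildB]
    split_ifs with h1 h2
    · exact ih d h
    · exact ih d h
    · apply ih
      have hne : k ≠ p.2 := by
        intro he; subst he
        rw [PySem.Dict.contains_eq_isSome_get?, h] at h2; simp at h2
      rw [PySem.Dict.get?_insert, if_neg hne, h]

-- Main invariant: A's interleaved pass from dict d equals B's detection pass
-- against the completed table built from d, provided d never maps an element of l
-- to the index it carries within l, and l's indexes are distinct.
theorem pvMain (ign : List Int) (l : List (Int × String)) (d : PySem.Dict String Int)
    (dup orig : List Int)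
    (hnd : (l.map Prod.fst).Nodup)
    (h1 : ∀ p ∈ l, ∀ j, d.get? p.2 = some j → j ≠ p.1) :
    ((l.foldl (pvStepA ign) (dup, orig, d)).1, (l.foldl (pvStepA ign) (dup, orig, d)).2.1)
      = l.foldl (pvStepB ign (l.foldl (pvBuildB ign) d)) (dup, orig) := by
  induction l generalizing d dup orig with
  | nil => rfl
  | cons p rest ih =>
    simp only [List.map_cons, List.nodup_cons] at hnd
    by_cases hig : ign.contains p.1
    · simp only [List.foldl_cons, pvStepA, pvStepB, pvBuildB, hig, if_true]
      exact ih d dup orig hnd.2 (fun q hq => h1 q (List.mem_cons_of_mem _ hq))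
    · have hig' : p.1 ∉ ign := by simpa using hig
      cases hget : d.get? p.2 with
      | some j =>
        have hcont : d.contains p.2 = true := by
          rw [PySem.Dict.contains_eq_isSome_get?, hget]; rfl
        have hbuild : (p :: rest).foldl (pvBuildB ign) d = rest.foldl (pvBuildB ign) d := by
          simp [List.foldl_cons, pvBuildB, hig', hcont]
        have hF : (rest.foldl (pvBuildB ign) d).get? p.2 = some j :=
          pvBuild_preserve ign rest d p.2 j hget
        have hjne : j ≠ p.1 := h1 p (List.mem_cons_self) j hget
        rw [hbuild]
        conv_rhs => rw [List.foldl_cons]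
        rw [show pvStepB ign (rest.foldl (pvBuildB ign) d) (dup, orig) p
              = (dup ++ [p.1], orig ++ [j]) from by
            simp [pvStepB, hig', hF, bne_iff_ne, hjne]]
        simp only [List.foldl_cons, pvStepA, hig, hget]
        simp only [Bool.false_eq_true, if_false]
        exact ih d (dup ++ [p.1]) (orig ++ [j]) hnd.2
          (fun q hq => h1 q (List.mem_cons_of_mem _ hq))
      | none =>
        have hcont : d.contains p.2 = false := by
          rw [PySem.Dict.contains_eq_isSome_get?, hget]; rfl
        have hbuild : (p :: rest).foldl (pvBuildB ign) d
            = rest.foldl (pvBuildB ign) (d.insert p.2 p.1) := by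
          simp [List.foldl_cons, pvBuildB, hig', hcont]
        have hF : (rest.foldl (pvBuildB ign) (d.insert p.2 p.1)).get? p.2 = some p.1 :=
          pvBuild_preserve ign rest _ p.2 p.1 (PySem.Dict.get?_insert_self _ _ _)
        rw [hbuild]
        conv_rhs => rw [List.foldl_cons]
        rw [show pvStepB ign (rest.foldl (pvBuildB ign) (d.insert p.2 p.1)) (dup, orig) p
              = (dup, orig) from by simp [pvStepB, hig', hF]]
        simp only [List.foldl_cons, pvStepA, hig, hget]
        simp only [Bool.false_eq_true, if_false]
        apply ih (d.insert p.2 p.1) dup orig hnd.2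
        intro q hq j hj
        by_cases hqe : q.2 = p.2
        · rw [hqe, PySem.Dict.get?_insert_self] at hj
          cases hj
          intro he
          exact hnd.1 (he ▸ (List.mem_map.mpr ⟨q, hq, rfl⟩))
        · rw [PySem.Dict.get?_insert, if_neg hqe] at hj
          exact h1 q (List.mem_cons_of_mem _ hq) j hj

-- The indexes produced by enumerate are pairwise distinct.
theorem pvEnumNodup (xs : List String) (s : Int) :
    ((PySem.List.enumerate xs s).map Prod.fst).Nodup := by
  have h := PySem.List.pairwise_lt_enumerate (xs := xs) (s := s)
  exact (List.pairwise_map.mpr h).imp (fun hlt => ne_of_lt hlt)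

-- ===== VERDICT (by name: the statement is the Claim_ definition above) =====
theorem check_self_duplicate_spec : Claim_equal_check_self_duplicate := by
  intro folder_properties ignore_indexes _
  unfold Spec_check_self_duplicate check_self_duplicate check_self_duplicate_alt
  exact pvMain (ignore_indexes.getD []) (PySem.List.enumerate folder_properties 0)
    PySem.Dict.empty [] [] (pvEnumNodup folder_properties 0)
    (by intro p _ j hj; simp [PySem.Dict.get?_empty] at hj)
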